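-- pv_equiv track=rewrite | github.com/line1029/problem-solving | LeetCode/Medium/2171-removing-minimum-number-of-magic-beans/2171-removing-minimum-number-of-magic-beans.py | minimumRemoval
-- ===== SOURCE A (Python) =====
-- from typing import List
--
-- def minimumRemoval(beans: List[int]) -> int:
--     beans.sort()
--     n = len(beans)
--     p_sum = [0] * (n + 1)
--     for idx, b in enumerate(beans, 1):
--         p_sum[idx] += p_sum[idx - 1] + b
--     ans = p_sum[-1]
--     for idx, b in enumerate(beans):
--         num = p_sum[idx] - p_sum[idx + 1] + p_sum[-1] - b * (n - idx - 1)
--         ans = min(ans, num)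
--     return ans
-- ===== SOURCE B (Python) =====
-- from typing import List
--
-- def minimumRemoval(beans: List[int]) -> int:
--     cnt = {}
--     for b in beans:
--         cnt[b] = cnt.get(b, 0) + 1
--     total = sum(beans)
--     kept = 0
--     ge = 0
--     for v in sorted(cnt, reverse=True):
--         ge += cnt[v]
--         kept = max(kept, v * ge)
--     return total - kept
-- ===== Notes on version B (the rewrite author's own statement) =====
-- stated objective: alternative
-- what changed: B never sorts the bean list: it builds a value->count histogram dict, scans the distinct values in descending order accumulating the number of beans >= v, maximizes the number of beans KEPT (v * count_ge), and returns total - kept, instead of A's sort + prefix-sum table + minimization of beans removed per index.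
import Mathlib
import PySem

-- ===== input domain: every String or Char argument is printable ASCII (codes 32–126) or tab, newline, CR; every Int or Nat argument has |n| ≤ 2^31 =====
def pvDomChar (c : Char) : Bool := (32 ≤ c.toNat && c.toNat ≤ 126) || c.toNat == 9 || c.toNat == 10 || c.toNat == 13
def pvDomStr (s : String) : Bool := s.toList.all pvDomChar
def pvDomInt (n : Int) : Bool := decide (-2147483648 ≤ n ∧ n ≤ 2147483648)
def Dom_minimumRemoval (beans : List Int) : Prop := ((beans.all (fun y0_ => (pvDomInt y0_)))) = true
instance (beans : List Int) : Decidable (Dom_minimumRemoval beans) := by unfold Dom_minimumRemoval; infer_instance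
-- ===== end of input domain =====

-- B replaces A's sort + prefix-sum minimization of removed beans by a value->count histogram
-- scanned over the distinct values in descending order, maximizing the beans KEPT; objective: alternative.
-- A sorts `beans` in place (B does not); the equivalence proved here is about the RETURN value.

-- ===== PORT A =====
-- literal transliteration of A: sort, build prefix-sum table, then min-scan using table lookups
-- (all indices are in range in Python, so the total pyGetD/pySetD forms are exact here)
def minimumRemoval (beans : List Int) : Int :=
  let bs := PySem.List.sorted beans (fun x => x) false
  let n := bs.length
  let p_sum : List Int := List.replicate (n + 1) 0
  let p_sum := (PySem.List.enumerate bs 1).foldl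
    (fun ps (ib : Int × Int) =>
      PySem.List.pySetD ps ib.1
        (PySem.List.pyGetD ps ib.1 0 + PySem.List.pyGetD ps (ib.1 - 1) 0 + ib.2)) p_sum
  let ans := PySem.List.pyGetD p_sum (-1) 0
  (PySem.List.enumerate bs 0).foldl
    (fun a (ib : Int × Int) =>
      min a (PySem.List.pyGetD p_sum ib.1 0 - PySem.List.pyGetD p_sum (ib.1 + 1) 0 +
             PySem.List.pyGetD p_sum (-1) 0 - ib.2 * ((n : Int) - ib.1 - 1))) ans

-- ===== PORT B =====
-- literal transliteration of B: histogram dict built by a loop, total = sum, then one pass over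
-- the distinct values sorted descending with state (kept, ge); returns total - kept
def minimumRemoval_alt (beans : List Int) : Int :=
  let cnt := beans.foldl (fun d b => d.insert b (d.getD b 0 + 1)) PySem.Dict.empty
  let total := beans.sum
  let st := (PySem.List.sorted (PySem.Dict.keys cnt) (fun x => x) true).foldl
    (fun (st : Int × Int) v =>
      let ge := st.2 + cnt.getD v 0
      (max st.1 (v * ge), ge)) ((0 : Int), (0 : Int))
  total - st.1

-- ===== PRECONDITION & SPEC =====
def Spec_minimumRemoval (beans : List Int) (out : Int) : Prop := out = minimumRemoval_alt beans
instance (beans : List Int) (out : Int) : Decidable (Spec_minimumRemoval beans out) := by unfold Spec_minimumRemoval; infer_instance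

-- ===== CLAIM (what is proved, stated in full; the proofs are below) =====
def Claim_equal_minimumRemoval : Prop := ∀ (beans : List Int), Dom_minimumRemoval beans → Spec_minimumRemoval beans (minimumRemoval beans)

-- ===== LEMMAS AND PROOFS =====

/-- running sums of `xs` starting from `c` (proof-only helper: the meaning of A's table). -/
def psums (c : Int) : List Int → List Int
  | [] => []
  | b :: t => (c + b) :: psums (c + b) t

theorem length_psums (c : Int) (xs : List Int) : (psums c xs).length = xs.length := by
  induction xs generalizing c with
  | nil => rfl
  | cons b t ih => simp [psums, ih]

theorem getElem?_psums (c : Int) (xs : List Int) (k : Nat) (hk : k < xs.length) :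
    (psums c xs)[k]? = some (c + (xs.take (k + 1)).sum) := by
  induction xs generalizing c k with
  | nil => simp at hk
  | cons b t ih =>
    cases k with
    | zero => simp [psums]
    | succ m =>
      simp only [psums, List.getElem?_cons_succ]
      rw [ih (c + b) m (by simpa using hk)]
      simp [add_assoc]

theorem getLast_cons_psums (c : Int) (xs : List Int) :
    (c :: psums c xs).getLast (by simp) = c + xs.sum := by
  induction xs generalizing c with
  | nil => simp [psums]
  | cons b t ih =>
    rw [psums, List.getLast_cons (by simp)]
    rw [ih (c + b)]
    simp [add_assoc]

/-- A's table-building loop: starting from `acc ++ zeros` with write index `acc.length`,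
    it appends the running sums of `xs` continued from `c = last of acc`. -/
theorem loopA (xs : List Int) (acc : List Int) (h : acc ≠ []) (c : Int)
    (hc : acc.getLast h = c) :
    (PySem.List.enumerate xs (acc.length : Int)).foldl
      (fun ps (ib : Int × Int) =>
        PySem.List.pySetD ps ib.1
          (PySem.List.pyGetD ps ib.1 0 + PySem.List.pyGetD ps (ib.1 - 1) 0 + ib.2))
      (acc ++ List.replicate xs.length 0)
    = acc ++ psums c xs := by
  induction xs generalizing acc c with
  | nil => simp [psums]
  | cons b t ih =>
    rw [PySem.List.enumerate_cons]
    simp only [List.foldl_cons]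
    have hlen : acc.length < (acc ++ List.replicate (b :: t).length 0).length := by
      simp
    have hget0 : PySem.List.pyGetD (acc ++ List.replicate (b :: t).length 0)
        (acc.length : Int) 0 = (0 : Int) := by
      rw [PySem.List.pyGetD_natCast]
      rw [List.getD_eq_getElem _ _ hlen]
      rw [List.getElem_append_right (by omega)]
      simp
    have hgetc : PySem.List.pyGetD (acc ++ List.replicate (b :: t).length 0)
        ((acc.length : Int) - 1) 0 = c := by
      have hacc : acc.dropLast ++ [c] = acc := by
        rw [← hc]; exact List.dropLast_concat_getLast h
      rw [← hacc]
      have h1 : ((acc.dropLast ++ [c]).length : Int) - 1 = ((acc.dropLast.length : Nat) : Int) := by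
        simp
      rw [h1, PySem.List.pyGetD_natCast]
      have h2 : acc.dropLast ++ [c] ++ List.replicate (b :: t).length 0
          = acc.dropLast ++ (c :: List.replicate (b :: t).length 0) := by simp
      rw [h2, List.getD_eq_getElem _ _ (by simp)]
      rw [List.getElem_append_right (by omega)]
      simp
    have hset : PySem.List.pySetD (acc ++ List.replicate (b :: t).length 0)
        (acc.length : Int) (0 + c + b)
        = (acc ++ [c + b]) ++ List.replicate t.length 0 := by
      rw [PySem.List.pySetD_natCast]
      have : acc ++ List.replicate (b :: t).length 0
          = acc ++ (0 :: List.replicate t.length 0) := by simp [List.replicate_succ]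
      rw [this, List.set_append_right _ _ (le_refl _)]
      simp [zero_add]
    rw [hget0, hgetc, hset]
    have hstart : (acc.length : Int) + 1 = ((acc ++ [c + b]).length : Int) := by simp
    rw [hstart, ih (acc ++ [c + b]) (by simp) (c + b) (by simp)]
    simp [psums]

/-- a pair-state min-scan, rephrased as an indexed min-scan over `enumerate`. -/
theorem loopB (xs : List Int) (T best s r : Int) :
    (xs.foldl (fun (st : Int × Int) b => (min st.1 (T - b * st.2), st.2 - 1)) (best, r)).1
    = (PySem.List.enumerate xs s).foldl
        (fun a (ib : Int × Int) => min a (T - ib.2 * (r + s - ib.1))) best := by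
  induction xs generalizing best s r with
  | nil => simp
  | cons b t ih =>
    rw [PySem.List.enumerate_cons]
    simp only [List.foldl_cons]
    rw [ih (min best (T - b * r)) (s + 1) (r - 1)]
    have h1 : r - 1 + (s + 1) = r + s := by ring
    have h2 : r + s - s = r := by ring
    rw [h1, h2]

/-- A reduces to a pair-state min-scan over the ascending sorted list. -/
theorem A_to_pairfold (beans : List Int) :
    minimumRemoval beans
    = ((PySem.List.sorted beans (fun x => x) false).foldl
        (fun (st : Int × Int) b =>
          (min st.1 ((PySem.List.sorted beans (fun x => x) false).sum - b * st.2), st.2 - 1))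
        ((PySem.List.sorted beans (fun x => x) false).sum,
         ((PySem.List.sorted beans (fun x => x) false).length : Int))).1 := by
  unfold minimumRemoval
  set bs := PySem.List.sorted beans (fun x => x) false with hbs
  simp only []
  have htab : (PySem.List.enumerate bs 1).foldl
      (fun ps (ib : Int × Int) =>
        PySem.List.pySetD ps ib.1
          (PySem.List.pyGetD ps ib.1 0 + PySem.List.pyGetD ps (ib.1 - 1) 0 + ib.2))
      (List.replicate (bs.length + 1) 0)
      = (0 : Int) :: psums 0 bs := by
    have := loopA bs [0] (by simp) 0 (by simp)
    simpa [List.replicate_succ] using this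
  rw [htab]
  have hlast : PySem.List.pyGetD ((0 : Int) :: psums 0 bs) (-1) 0 = bs.sum := by
    rw [PySem.List.pyGetD_neg_one (h := by simp)]
    simpa using getLast_cons_psums 0 bs
  rw [hlast]
  have hgetk : ∀ k : Nat, k ≤ bs.length →
      PySem.List.pyGetD ((0 : Int) :: psums 0 bs) (k : Int) 0 = (bs.take k).sum := by
    intro k hk
    rw [PySem.List.pyGetD_natCast]
    cases k with
    | zero => simp
    | succ m =>
      rw [List.getD_eq_getElem _ _ (by simp [length_psums]; omega)]
      simp only [List.getElem_cons_succ]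
      have hget := getElem?_psums 0 bs m (by omega)
      rw [List.getElem?_eq_getElem (by rw [length_psums]; omega)] at hget
      rw [Option.some.injEq] at hget
      rw [hget]
      simp
  rw [PySem.List.foldl_congr_mem
    (g := fun a (ib : Int × Int) => min a (bs.sum - ib.2 * ((bs.length : Int) + 0 - ib.1)))]
  · rw [← loopB bs bs.sum bs.sum 0 (bs.length : Int)]
  · intro a ib hib
    rw [PySem.List.mem_enumerate_iff] at hib
    obtain ⟨k, hk, rfl⟩ := hib
    simp only [zero_add]
    have h1 : PySem.List.pyGetD ((0 : Int) :: psums 0 bs) ((k : Nat) : Int) 0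
        = (bs.take k).sum := hgetk k (by omega)
    have h2 : PySem.List.pyGetD ((0 : Int) :: psums 0 bs) (((k : Nat) : Int) + 1) 0
        = (bs.take (k + 1)).sum := by
      have : (((k : Nat) : Int) + 1) = ((k + 1 : Nat) : Int) := by push_cast; ring
      rw [this]; exact hgetk (k + 1) (by omega)
    rw [h1, h2]
    rw [List.sum_take_succ bs k hk]
    ring_nf

/-- maximum number of beans keepable from a sorted-ascending list, clamped at 0
    (the head `b` can serve all `t.length + 1` remaining elements). -/
def MidK : List Int → Int
  | [] => 0
  | b :: t => max (b * ((t.length : Int) + 1)) (MidK t)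

theorem MidK_nonneg (t : List Int) : 0 ≤ MidK t := by
  induction t with
  | nil => simp [MidK]
  | cons b t ih => exact le_max_of_le_right ih

theorem pairfold_eq (T : Int) (t : List Int) (acc : Int) (hacc : acc ≤ T) :
    (t.foldl (fun (st : Int × Int) b => (min st.1 (T - b * st.2), st.2 - 1))
      (acc, (t.length : Int))).1 = min acc (T - MidK t) := by
  induction t generalizing acc with
  | nil => simp [MidK, min_eq_left hacc]
  | cons b t ih =>
    simp only [List.foldl_cons, MidK]
    have hlen : ((b :: t).length : Int) - 1 = (t.length : Int) := by simp
    rw [hlen]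
    rw [ih (min acc (T - b * ((b :: t).length : Int))) (le_trans (min_le_left _ _) hacc)]
    have hc : ((b :: t).length : Int) = (t.length : Int) + 1 := by simp
    rw [hc, min_assoc]
    congr 1
    omega

-- FD: a max-scan over a full descending list with state (count, kept)
theorem FD_counter (rs : List Int) (c m : Int) :
    ((rs.foldl (fun (st : Int × Int) v => (st.1 + 1, max st.2 (v * (st.1 + 1)))) (c, m))).1
    = c + rs.length := by
  induction rs generalizing c m with
  | nil => simp
  | cons v rs ih => simp only [List.foldl_cons]; rw [ih]; simp only [List.length_cons]; push_cast; ring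

theorem FD_reverse_eq_MidK (bs : List Int) :
    ((bs.reverse.foldl (fun (st : Int × Int) v => (st.1 + 1, max st.2 (v * (st.1 + 1))))
      ((0 : Int), (0 : Int)))).2 = MidK bs := by
  induction bs with
  | nil => simp [MidK]
  | cons b t ih =>
    rw [List.reverse_cons, List.foldl_append]
    have h1 : ((t.reverse.foldl (fun (st : Int × Int) v => (st.1 + 1, max st.2 (v * (st.1 + 1))))
        ((0 : Int), (0 : Int)))).1 = (t.length : Int) := by
      rw [FD_counter]; simp
    rcases hsplit : t.reverse.foldl (fun (st : Int × Int) v => (st.1 + 1, max st.2 (v * (st.1 + 1))))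
        ((0 : Int), (0 : Int)) with ⟨c, m⟩
    rw [hsplit] at h1 ih
    simp only [List.foldl_cons, List.foldl_nil, MidK]
    simp only [] at h1 ih
    rw [h1, ih]
    exact max_comm _ _

theorem FD_replicate (v : Int) (c : Nat) (hc : 1 ≤ c) (ge kept : Int)
    (hge : 0 ≤ ge) (hkept : 0 ≤ kept) :
    ((List.replicate c v).foldl
      (fun (st : Int × Int) w => (st.1 + 1, max st.2 (w * (st.1 + 1)))) (ge, kept))
    = (ge + (c : Int), max kept (v * (ge + (c : Int)))) := by
  induction c generalizing ge kept with
  | zero => omega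
  | succ c ih =>
    rcases Nat.eq_or_lt_of_le hc with h1 | h1
    · simp [← h1]
    · have hc' : 1 ≤ c := by omega
      rw [List.replicate_succ, List.foldl_cons]
      rw [ih hc' (ge + 1) (max kept (v * (ge + 1))) (by omega) (le_max_of_le_left hkept)]
      have hA1 : v * (ge + 1) ≤ max kept (v * (ge + 1 + (c : Int))) := by
        have hcnn : (0 : Int) ≤ (c : Int) := Int.natCast_nonneg c
        by_cases hv : 0 ≤ v
        · exact le_max_of_le_right (mul_le_mul_of_nonneg_left (by omega) hv)
        · exact le_max_of_le_left
            (le_trans (mul_nonpos_of_nonpos_of_nonneg (by omega) (by omega)) hkept)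
      rw [max_right_comm, max_eq_left hA1]
      have : ge + 1 + (c : Int) = ge + ((c : Nat) + 1 : Nat) := by push_cast; ring
      rw [this]

/-- the expansion of a descending distinct-value list back into a full multiplicity list. -/
def flatOf (beans ds : List Int) : List Int :=
  ds.flatMap (fun v => List.replicate (beans.count v) v)

theorem count_flatOf (beans ds : List Int) (hnd : ds.Nodup) (x : Int) :
    (flatOf beans ds).count x = if x ∈ ds then beans.count x else 0 := by
  induction ds with
  | nil => simp [flatOf]
  | cons v ds ih =>
    rcases List.nodup_cons.mp hnd with ⟨hv, hnd'⟩
    simp only [flatOf, List.flatMap_cons, List.count_append]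
    rw [show (ds.flatMap (fun v => List.replicate (beans.count v) v)) = flatOf beans ds from rfl]
    rw [ih hnd']
    by_cases hx : x = v
    · subst hx
      simp [hv]
    · simp [List.count_replicate, Ne.symm hx, hx]

theorem flatOf_perm (beans ds : List Int) (hnd : ds.Nodup)
    (hmem : ∀ x, x ∈ ds ↔ x ∈ beans) : (flatOf beans ds).Perm beans := by
  rw [List.perm_iff_count]
  intro x
  rw [count_flatOf _ _ hnd]
  by_cases hx : x ∈ beans
  · rw [if_pos ((hmem x).mpr hx)]
  · rw [if_neg (fun h => hx ((hmem x).mp h))]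
    exact (List.count_eq_zero.mpr hx).symm

theorem flatOf_sorted (beans ds : List Int) (h : ds.Pairwise (fun a b => b ≤ a)) :
    (flatOf beans ds).Pairwise (fun a b : Int => b ≤ a) := by
  induction ds with
  | nil => simp [flatOf]
  | cons v ds ih =>
    rcases List.pairwise_cons.mp h with ⟨hv, h'⟩
    simp only [flatOf, List.flatMap_cons]
    apply List.pairwise_append.mpr
    refine ⟨List.pairwise_replicate.mpr (Or.inr le_rfl), ih h', ?_⟩
    intro a ha b hb
    rw [List.eq_of_mem_replicate ha]
    obtain ⟨w, hw, hbw⟩ := List.mem_flatMap.mp hb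
    rw [List.eq_of_mem_replicate hbw]
    exact hv w hw

/-- B's distinct-value fold equals the full-multiplicity fold FD, with swapped state pairing. -/
theorem Bfold_eq_FD (beans ds : List Int) (hcnt : ∀ v ∈ ds, 1 ≤ beans.count v)
    (kept ge : Int) (hkept : 0 ≤ kept) (hge : 0 ≤ ge) :
    ds.foldl (fun (st : Int × Int) v =>
        (max st.1 (v * (st.2 + (beans.count v : Int))), st.2 + (beans.count v : Int)))
      (kept, ge)
    = (((flatOf beans ds).foldl
         (fun (st : Int × Int) w => (st.1 + 1, max st.2 (w * (st.1 + 1)))) (ge, kept)).2,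
       ((flatOf beans ds).foldl
         (fun (st : Int × Int) w => (st.1 + 1, max st.2 (w * (st.1 + 1)))) (ge, kept)).1) := by
  induction ds generalizing kept ge with
  | nil => simp [flatOf]
  | cons v ds ih =>
    have hc1 : 1 ≤ beans.count v := hcnt v (List.mem_cons_self ..)
    simp only [flatOf, List.flatMap_cons, List.foldl_append, List.foldl_cons]
    rw [FD_replicate v (beans.count v) hc1 ge kept hge hkept]
    rw [show (ds.flatMap (fun v => List.replicate (beans.count v) v)) = flatOf beans ds from rfl]
    exact ih (fun w hw => hcnt w (List.mem_cons_of_mem _ hw))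
      (max kept (v * (ge + (beans.count v : Int))))
      (ge + (beans.count v : Int))
      (le_max_of_le_left hkept) (by positivity)

/-- list equality from a permutation and a shared descending order. -/
theorem eq_of_perm_ge {l₁ l₂ : List Int} (h1 : l₁.Pairwise (fun a b => b ≤ a))
    (h2 : l₂.Pairwise (fun a b => b ≤ a)) (hp : l₁.Perm l₂) : l₁ = l₂ :=
  List.Perm.eq_of_pairwise (fun _ _ _ _ hab hba => le_antisymm hba hab) h1 h2 hp

/-- the descending sorted full list is the expansion of the descending distinct values. -/
theorem reverse_sorted_eq_flatOf (beans : List Int) :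
    (PySem.List.sorted beans (fun x => x) false).reverse
    = flatOf beans (PySem.List.sorted (PySem.Set.ofList beans) (fun x => x) true) := by
  have hnd : (PySem.List.sorted (PySem.Set.ofList beans) (fun x => x) true).Nodup :=
    (PySem.List.sorted_perm (PySem.Set.ofList beans) (fun x => x) true).nodup_iff.mpr
      (PySem.Set.nodup_ofList beans)
  have hmem : ∀ x, x ∈ PySem.List.sorted (PySem.Set.ofList beans) (fun x => x) true ↔ x ∈ beans := by
    intro x
    rw [PySem.List.mem_sorted, PySem.Set.mem_ofList]
  apply eq_of_perm_ge
  · exact List.pairwise_reverse.mpr (PySem.List.sorted_pairwise beans (fun x => x))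
  · exact flatOf_sorted beans _ (PySem.List.sorted_pairwise_rev (PySem.Set.ofList beans) (fun x => x))
  · exact ((List.reverse_perm _).trans
      (PySem.List.sorted_perm beans (fun x => x) false)).trans
      (flatOf_perm beans _ hnd hmem).symm

/-- A's side: minimumRemoval = total − MidK of the ascending sorted list. -/
theorem A_eq (beans : List Int) :
    minimumRemoval beans
    = beans.sum - MidK (PySem.List.sorted beans (fun x => x) false) := by
  rw [A_to_pairfold]
  rw [pairfold_eq _ _ _ (le_refl _)]
  rw [min_eq_right (by have := MidK_nonneg (PySem.List.sorted beans (fun x => x) false); omega)]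
  rw [(PySem.List.sorted_perm beans (fun x => x) false).sum_eq]

/-- B's side: minimumRemoval_alt = total − MidK of the ascending sorted list. -/
theorem B_eq (beans : List Int) :
    minimumRemoval_alt beans
    = beans.sum - MidK (PySem.List.sorted beans (fun x => x) false) := by
  unfold minimumRemoval_alt
  rw [PySem.Dict.foldl_insert_getD_add_one_eq_counter]
  simp only [PySem.Dict.keys_counter, PySem.Dict.getD_counter]
  have hcnt : ∀ v ∈ PySem.List.sorted (PySem.Set.ofList beans) (fun x => x) true,
      1 ≤ beans.count v := by
    intro v hv
    rw [PySem.List.mem_sorted, PySem.Set.mem_ofList] at hv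
    exact List.count_pos_iff.mpr hv
  rw [Bfold_eq_FD beans _ hcnt 0 0 (le_refl _) (le_refl _)]
  rw [← reverse_sorted_eq_flatOf, FD_reverse_eq_MidK]

-- ===== VERDICT (by name: the statement is the Claim_ definition above) =====
theorem minimumRemoval_spec : Claim_equal_minimumRemoval := by
  intro beans _
  unfold Spec_minimumRemoval
  rw [A_eq, B_eq]
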